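-- pv_equiv track=rewrite | github.com/FlourishingHumanityCorporation/AutoTaskTracker | autotasktracker/dashboards/data/text_utils.py | _extract_programming_context
-- ===== SOURCE A (Python) =====
-- def _extract_programming_context(title_lower: str) -> str:
--     """Extract programming-specific context."""
--     if any(word in title_lower for word in ['test', 'testing', 'unit', 'integration']):
--         return "Programming - Testing"
--     elif any(word in title_lower for word in ['debug', 'error', 'fix', 'bug']):
--         return "Programming - Debugging"
--     elif any(word in title_lower for word in ['deploy', 'build', 'ci', 'cd']):
--         return "Programming - DevOps"
--     elif any(word in title_lower for word in ['review', 'pull request', 'merge']):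
--         return "Programming - Code Review"
--     else:
--         return "Programming - Development"
-- ===== SOURCE B (Python) =====
-- # B: aggregate over a keyword->priority dict (min matched priority) instead of a branch chain (alternative; RETURN-value equivalence).
-- _PRIORITY = {
--     'test': 0, 'testing': 0, 'unit': 0, 'integration': 0,
--     'debug': 1, 'error': 1, 'fix': 1, 'bug': 1,
--     'deploy': 2, 'build': 2, 'ci': 2, 'cd': 2,
--     'review': 3, 'pull request': 3, 'merge': 3,
-- }
-- _LABELS = [
--     "Programming - Testing",
--     "Programming - Debugging",
--     "Programming - DevOps",
--     "Programming - Code Review",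
--     "Programming - Development",
-- ]
--
-- def _extract_programming_context(title_lower: str) -> str:
--     """Extract programming-specific context."""
--     best = 4
--     for w, p in _PRIORITY.items():
--         if w in title_lower and p < best:
--             best = p
--     return _LABELS[best]
-- ===== Notes on version B (the rewrite author's own statement) =====
-- stated objective: alternative
-- what changed: Instead of a four-way elif chain of any() scans, B builds a keyword-to-priority dict, takes the minimum priority among keywords occurring in the title (default 4), and indexes a label table with it; precedence is preserved because group priorities are ordered.
import Mathlib
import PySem

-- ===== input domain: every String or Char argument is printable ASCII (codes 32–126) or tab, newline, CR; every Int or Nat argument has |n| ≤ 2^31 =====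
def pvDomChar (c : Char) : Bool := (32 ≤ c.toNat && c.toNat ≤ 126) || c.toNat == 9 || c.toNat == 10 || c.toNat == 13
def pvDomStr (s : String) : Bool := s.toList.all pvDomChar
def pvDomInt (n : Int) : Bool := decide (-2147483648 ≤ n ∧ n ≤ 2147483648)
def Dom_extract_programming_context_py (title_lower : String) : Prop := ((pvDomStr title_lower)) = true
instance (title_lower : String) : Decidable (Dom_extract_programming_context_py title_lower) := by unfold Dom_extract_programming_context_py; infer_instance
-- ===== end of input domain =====

-- B computes the minimum matched keyword priority over a keyword->priority dict and indexes a label table, instead of A's elif chain (alternative; same cost).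


-- ===== PORT A =====
def extract_programming_context_py (title_lower : String) : String :=
  if ["test", "testing", "unit", "integration"].any (fun word => PySem.Str.isIn word title_lower) then
    "Programming - Testing"
  else if ["debug", "error", "fix", "bug"].any (fun word => PySem.Str.isIn word title_lower) then
    "Programming - Debugging"
  else if ["deploy", "build", "ci", "cd"].any (fun word => PySem.Str.isIn word title_lower) then
    "Programming - DevOps"
  else if ["review", "pull request", "merge"].any (fun word => PySem.Str.isIn word title_lower) then
    "Programming - Code Review"
  else
    "Programming - Development"

-- ===== PORT B =====
-- keyword -> priority dict (insertion order), as in Source B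
def pvPriority : List (String × Int) :=
  [("test", 0), ("testing", 0), ("unit", 0), ("integration", 0),
   ("debug", 1), ("error", 1), ("fix", 1), ("bug", 1),
   ("deploy", 2), ("build", 2), ("ci", 2), ("cd", 2),
   ("review", 3), ("pull request", 3), ("merge", 3)]

def pvLabels : List String :=
  ["Programming - Testing", "Programming - Debugging", "Programming - DevOps",
   "Programming - Code Review", "Programming - Development"]

def extract_programming_context_py_alt (title_lower : String) : String :=
  -- best = 4; for w, p in _PRIORITY.items(): if w in title_lower and p < best: best = p
  let best := pvPriority.foldl
    (fun best wp => if PySem.Str.isIn wp.1 title_lower && decide (wp.2 < best) then wp.2 else best) 4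
  -- return _LABELS[best]  (best is always a valid index)
  (PySem.List.pyGet? pvLabels best).getD ""

-- ===== PRECONDITION & SPEC =====
def Spec_extract_programming_context_py (title_lower : String) (out : String) : Prop := out = extract_programming_context_py_alt title_lower
instance (title_lower : String) (out : String) : Decidable (Spec_extract_programming_context_py title_lower out) := by unfold Spec_extract_programming_context_py; infer_instance

-- ===== CLAIM (what is proved, stated in full; the proofs are below) =====
def Claim_equal_extract_programming_context_py : Prop := ∀ (title_lower : String), Dom_extract_programming_context_py title_lower → Spec_extract_programming_context_py title_lower (extract_programming_context_py title_lower)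

-- ===== LEMMAS AND PROOFS =====

-- One group of equal-priority keywords folds to a single conditional min step.
theorem pv_foldl_group (t : String) (p : Int) (ws : List String)
    (rest : List (String × Int)) (b : Int) :
    ((ws.map (fun w => (w, p)) ++ rest).foldl
      (fun best wp => if PySem.Str.isIn wp.1 t && decide (wp.2 < best) then wp.2 else best) b)
    = rest.foldl
      (fun best wp => if PySem.Str.isIn wp.1 t && decide (wp.2 < best) then wp.2 else best)
      (if ws.any (fun w => PySem.Str.isIn w t) && decide (p < b) then p else b) := by
  induction ws generalizing b with
  | nil => simp
  | cons w ws ih =>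
    simp only [List.map_cons, List.cons_append, List.foldl_cons, List.any_cons]
    rw [ih]
    congr 1
    rcases (PySem.Str.isIn w t).eq_false_or_eq_true with hw | hw <;>
      rcases (ws.any fun w => PySem.Str.isIn w t).eq_false_or_eq_true with ha | ha <;>
      simp only [hw, ha, Bool.or_false, Bool.or_true, Bool.true_and, Bool.false_and,
        decide_eq_true_eq, if_neg, Bool.false_eq_true, not_false_eq_true] <;>
      first
        | rfl
        | omega

-- ===== VERDICT (by name: the statement is the Claim_ definition above) =====
theorem extract_programming_context_py_spec : Claim_equal_extract_programming_context_py := by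
  intro title_lower _
  unfold Spec_extract_programming_context_py extract_programming_context_py
    extract_programming_context_py_alt pvLabels
  rw [show pvPriority =
        (["test", "testing", "unit", "integration"].map (fun w => (w, (0 : Int)))) ++
        ((["debug", "error", "fix", "bug"].map (fun w => (w, (1 : Int)))) ++
        ((["deploy", "build", "ci", "cd"].map (fun w => (w, (2 : Int)))) ++
        ((["review", "pull request", "merge"].map (fun w => (w, (3 : Int)))) ++ [])))
      from rfl]
  rw [pv_foldl_group, pv_foldl_group, pv_foldl_group, pv_foldl_group]
  simp only [List.foldl_nil]
  generalize (["test", "testing", "unit", "integration"].any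
    fun word => PySem.Str.isIn word title_lower) = g1
  generalize (["debug", "error", "fix", "bug"].any
    fun word => PySem.Str.isIn word title_lower) = g2
  generalize (["deploy", "build", "ci", "cd"].any
    fun word => PySem.Str.isIn word title_lower) = g3
  generalize (["review", "pull request", "merge"].any
    fun word => PySem.Str.isIn word title_lower) = g4
  revert g1 g2 g3 g4
  decide
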